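-- pv_equiv track=rewrite | github.com/maximilianogomez/Progra1 | Practica 4/4.3.py | claves_separadas
-- ===== SOURCE A (Python) =====
-- def claves_separadas(maestra):
--     num1 = ""
--     num2 = ""
--     for i in range(len(maestra)):
--         if i % 2 == 0:
--             num1 = num1 + maestra[i]
--         else:
--             num2 = num2 + maestra[i]
--     return num1,num2
-- ===== SOURCE B (Python) =====
-- def claves_separadas(maestra):
--     return maestra[::2], maestra[1::2]
-- ===== Notes on version B (the rewrite author's own statement) =====
-- stated objective: idiomatic
-- what changed: Replaces the index loop with per-index parity tests and incremental string concatenation by two closed-form strided slices maestra[::2] and maestra[1::2].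
import Mathlib
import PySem

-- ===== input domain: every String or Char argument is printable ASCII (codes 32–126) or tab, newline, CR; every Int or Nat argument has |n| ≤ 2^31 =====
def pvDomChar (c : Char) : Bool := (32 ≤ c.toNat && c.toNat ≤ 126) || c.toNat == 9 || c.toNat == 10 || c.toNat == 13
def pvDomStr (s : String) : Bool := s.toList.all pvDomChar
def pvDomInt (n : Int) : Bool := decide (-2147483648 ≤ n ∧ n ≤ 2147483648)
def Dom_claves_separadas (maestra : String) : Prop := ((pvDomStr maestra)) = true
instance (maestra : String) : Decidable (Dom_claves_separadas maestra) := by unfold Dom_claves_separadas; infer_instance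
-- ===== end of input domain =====

-- B replaces the index loop with parity tests by two strided slices maestra[::2] / maestra[1::2] (idiomatic closed-form extraction).

-- ===== PORT A =====
-- A: loop i over range(len(maestra)), append maestra[i] to num1 on even i, to num2 on odd i.
-- String accumulators are carried as List Char (string concatenation = list append), packed at the end.
def claves_separadas (maestra : String) : String × String :=
  let cs := maestra.toList
  let p := (PySem.List.pyRange 0 (PySem.Str.len maestra) 1).foldl
    (fun (acc : List Char × List Char) i =>
      if i % 2 == 0 then (acc.1 ++ [PySem.List.pyGetD cs i ' '], acc.2)
      else (acc.1, acc.2 ++ [PySem.List.pyGetD cs i ' ']))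
    ([], [])
  (String.ofList p.1, String.ofList p.2)

-- ===== PORT B =====
-- B: return maestra[::2], maestra[1::2]  (slicing never fails in Python; step 2 ≠ 0, so .getD "" is exact)
def claves_separadas_alt (maestra : String) : String × String :=
  ((PySem.Str.slice? maestra none none 2).getD "",
   (PySem.Str.slice? maestra (some 1) none 2).getD "")

-- ===== PRECONDITION & SPEC =====
def Spec_claves_separadas (maestra : String) (out : String × String) : Prop := out = claves_separadas_alt maestra
instance (maestra : String) (out : String × String) : Decidable (Spec_claves_separadas maestra out) := by unfold Spec_claves_separadas; infer_instance

-- ===== CLAIM (what is proved, stated in full; the proofs are below) =====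
def Claim_equal_claves_separadas : Prop := ∀ (maestra : String), Dom_claves_separadas maestra → Spec_claves_separadas maestra (claves_separadas maestra)

-- ===== LEMMAS AND PROOFS =====

-- proof helper: the evens/odds split by structural recursion, two characters at a time
def sepGo : List Char → List Char × List Char
  | [] => ([], [])
  | [c] => ([c], [])
  | c1 :: c2 :: rest =>
    let p := sepGo rest
    (c1 :: p.1, c2 :: p.2)

-- A's loop, viewed over enumerate, computes sepGo
theorem claves_foldl_enumerate (cs : List Char) (s : Int) (acc1 acc2 : List Char)
    (hs : s % 2 = 0) :
    (PySem.List.enumerate cs s).foldl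
      (fun (acc : List Char × List Char) (p : Int × Char) =>
        if p.1 % 2 == 0 then (acc.1 ++ [p.2], acc.2) else (acc.1, acc.2 ++ [p.2]))
      (acc1, acc2)
    = (acc1 ++ (sepGo cs).1, acc2 ++ (sepGo cs).2) := by
  induction cs using sepGo.induct generalizing s acc1 acc2 with
  | case1 => simp [PySem.List.enumerate_nil, sepGo]
  | case2 c =>
    have h1 : (s % 2 == 0) = true := by simp [hs]
    simp [PySem.List.enumerate_cons, PySem.List.enumerate_nil, sepGo]
    omega
  | case3 c1 c2 rest ih =>
    have h1 : (s % 2 == 0) = true := by simp [hs]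
    have h2 : ((s + 1) % 2 == 0) = false := by
      simp only [beq_eq_false_iff_ne, ne_eq]
      omega
    have h3 : (s + 1 + 1) % 2 = 0 := by omega
    simp only [PySem.List.enumerate_cons, List.foldl_cons, h1, h2, if_true]
    rw [ih (s + 1 + 1) _ _ h3]
    simp [sepGo]

-- sepGo's components as the strided index comprehensions
theorem sepGo_fst (cs : List Char) :
    (sepGo cs).1 = (List.range ((cs.length + 1) / 2)).filterMap (fun k => cs[2 * k]?) := by
  induction cs using sepGo.induct with
  | case1 => simp [sepGo]
  | case2 c => simp [sepGo]
  | case3 c1 c2 rest ih =>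
    have hlen : ((c1 :: c2 :: rest).length + 1) / 2 = (rest.length + 1) / 2 + 1 := by
      simp only [List.length_cons]; omega
    rw [hlen, List.range_succ_eq_map, List.filterMap_cons, List.filterMap_map]
    simp only [sepGo, Function.comp]
    rw [ih]
    have he : ∀ x : Nat, (c1 :: c2 :: rest)[2 * x.succ]? = rest[2 * x]? := by
      intro x
      have h2 : 2 * x.succ = 2 * x + 1 + 1 := by omega
      simp [h2]
    simp [he]

theorem sepGo_snd (cs : List Char) :
    (sepGo cs).2 = (List.range (cs.length / 2)).filterMap (fun k => cs[2 * k + 1]?) := by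
  induction cs using sepGo.induct with
  | case1 => simp [sepGo]
  | case2 c => simp [sepGo]
  | case3 c1 c2 rest ih =>
    have hlen : (c1 :: c2 :: rest).length / 2 = rest.length / 2 + 1 := by
      simp only [List.length_cons]; omega
    rw [hlen, List.range_succ_eq_map, List.filterMap_cons, List.filterMap_map]
    simp only [sepGo, Function.comp]
    rw [ih]
    have he : ∀ x : Nat, (c1 :: c2 :: rest)[2 * x.succ + 1]? = rest[2 * x + 1]? := by
      intro x
      have h2 : 2 * x.succ + 1 = 2 * x + 1 + 1 + 1 := by omega
      simp [h2]
    simp [he]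

-- the two strided slices compute sepGo's components
theorem slice?_evens (cs : List Char) :
    PySem.List.slice? cs none none 2 = some (sepGo cs).1 := by
  rw [sepGo_fst]
  simp only [PySem.List.slice?, PySem.List.sliceIndices]
  norm_num
  have hc : (if 0 < cs.length then (((cs.length : Int) + 2 - 1) / 2).toNat else 0)
      = (cs.length + 1) / 2 := by split_ifs <;> omega
  rw [hc]
  apply List.filterMap_congr
  intro k hk
  have h2 : (2 * (k : Int)).toNat = 2 * k := by omega
  rw [h2]

theorem slice?_odds (cs : List Char) :
    PySem.List.slice? cs (some 1) none 2 = some (sepGo cs).2 := by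
  rw [sepGo_snd]
  cases cs with
  | nil => simp [PySem.List.slice?, PySem.List.sliceIndices]
  | cons c rest =>
    simp only [PySem.List.slice?, PySem.List.sliceIndices]
    norm_num
    have hc : (if 0 < rest.length then (((rest.length : Int) + 2 - 1) / 2).toNat else 0)
        = (rest.length + 1) / 2 := by split_ifs <;> omega
    rw [hc]
    apply List.filterMap_congr
    intro k hk
    have h2 : (1 + 2 * (k : Int)).toNat = 2 * k + 1 := by omega
    rw [h2]
    simp

-- ===== VERDICT (by name: the statement is the Claim_ definition above) =====
theorem claves_separadas_spec : Claim_equal_claves_separadas := by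
  intro maestra _
  unfold Spec_claves_separadas claves_separadas claves_separadas_alt
  have key : List.foldl
      (fun (acc : List Char × List Char) (i : Int) =>
        if i % 2 == 0 then (acc.1 ++ [PySem.List.pyGetD maestra.toList i ' '], acc.2)
        else (acc.1, acc.2 ++ [PySem.List.pyGetD maestra.toList i ' ']))
      ([], []) (PySem.List.pyRange 0 (PySem.Str.len maestra) 1)
      = sepGo maestra.toList := by
    have hlen : PySem.Str.len maestra = PySem.List.len maestra.toList := by
      simp [PySem.Str.len, PySem.List.len]
    have h := claves_foldl_enumerate maestra.toList 0 [] [] rfl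
    rw [PySem.List.enumerate_eq_map_pyRange maestra.toList ' ', List.foldl_map] at h
    simpa [hlen] using h
  simp only [key, PySem.Str.slice?, PySem.Chars.slice?_eq_listSlice?,
    slice?_evens, slice?_odds, Option.map_some, Option.getD_some]
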